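-- pv_equiv track=rewrite | github.com/KolyaKleynota/test_for_BAD | main.py | my_foo
-- ===== SOURCE A (Python) =====
-- def my_foo(first_letters):
--     flag = False
--     for i in range(len(first_letters)):
--         flag = False
--         for j in range(i + 1, len(first_letters)):
--             if first_letters[i] == first_letters[j]:
--                 flag = True
--         if not flag:
--             return first_letters[i]
-- ===== SOURCE B (Python) =====
-- def my_foo(first_letters):
--     # single backward pass with a seen-set: the last char (in backward order)
--     # that is not yet seen is the first char with no later duplicate
--     ans = None
--     seen = set()
--     for c in reversed(first_letters):
--         if c not in seen:
--             ans = c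
--         seen.add(c)
--     return ans
-- ===== Notes on version B (the rewrite author's own statement) =====
-- stated objective: faster
-- what changed: Replaces A's nested forward rescan (for each i, scan all j>i) with one backward pass keeping a set of chars already seen to its right; the answer is the last backward position whose char is unseen.
import Mathlib
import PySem

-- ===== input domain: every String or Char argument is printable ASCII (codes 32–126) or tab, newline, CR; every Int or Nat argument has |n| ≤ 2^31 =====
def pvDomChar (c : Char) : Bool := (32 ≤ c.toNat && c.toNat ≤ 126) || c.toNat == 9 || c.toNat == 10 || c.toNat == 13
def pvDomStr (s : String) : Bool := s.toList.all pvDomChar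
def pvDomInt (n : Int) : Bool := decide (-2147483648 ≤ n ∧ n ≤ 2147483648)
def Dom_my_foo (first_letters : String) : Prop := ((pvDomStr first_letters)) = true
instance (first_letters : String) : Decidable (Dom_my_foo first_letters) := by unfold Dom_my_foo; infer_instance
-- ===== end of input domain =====

-- B replaces A's quadratic nested rescan by one backward pass with a seen-set (objective: faster).

-- ===== PORT A =====
-- inner loop: 'for j in range(i+1, len): if s[i] == s[j]: flag = True' (indices always in range, so pyGetD is exact)
def myFooAflag (cs : List Char) (i : Nat) : Bool :=
  (PySem.List.pyRange ((i : Int) + 1) (cs.length : Int) 1).foldl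
    (fun flag j => if PySem.List.pyGetD cs (i : Int) ' ' == PySem.List.pyGetD cs j ' ' then true else flag) false

-- outer loop: 'for i in range(len): … if not flag: return s[i]'; falls off the end → None
def myFooALoop (cs : List Char) (i : Nat) : Option String :=
  if _h : i < cs.length then
    if myFooAflag cs i then myFooALoop cs (i + 1)
    else some (String.mk [PySem.List.pyGetD cs (i : Int) ' '])
  else none
termination_by cs.length - i

def my_foo (first_letters : String) : Option String :=
  myFooALoop first_letters.toList 0

-- ===== PORT B =====
-- 'for c in reversed(s): if c not in seen: ans = c; seen.add(c)'
def myFooBStep (st : Option Char × PySem.Set Char) (c : Char) : Option Char × PySem.Set Char :=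
  (if PySem.Set.contains st.2 c then st.1 else some c, PySem.Set.add st.2 c)

def my_foo_alt (first_letters : String) : Option String :=
  (first_letters.toList.reverse.foldl myFooBStep (none, PySem.Set.empty)).1.map
    (fun c => String.mk [c])

-- ===== PRECONDITION & SPEC =====
def Spec_my_foo (first_letters : String) (out : Option String) : Prop := out = my_foo_alt first_letters
instance (first_letters : String) (out : Option String) : Decidable (Spec_my_foo first_letters out) := by unfold Spec_my_foo; infer_instance

-- ===== CLAIM (what is proved, stated in full; the proofs are below) =====
def Claim_equal_my_foo : Prop := ∀ (first_letters : String), Dom_my_foo first_letters → Spec_my_foo first_letters (my_foo first_letters)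

-- ===== LEMMAS AND PROOFS =====

-- reference function: first char with no later duplicate
def pvRef : List Char → Option Char
  | [] => none
  | c :: rest => if c ∈ rest then pvRef rest else some c

theorem foldl_or_any (x : Char) (l : List Char) (b : Bool) :
    l.foldl (fun acc c => if x == c then true else acc) b = (b || l.any (x == ·)) := by
  induction l generalizing b with
  | nil => simp
  | cons c t ih =>
      simp only [List.foldl_cons, List.any_cons, ih]
      by_cases h : x == c <;> simp [h]

theorem myFooAflag_eq (cs : List Char) (i : Nat) (h : i < cs.length) :
    myFooAflag cs i = decide (cs[i] ∈ cs.drop (i + 1)) := by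
  unfold myFooAflag
  rw [show ((i : Int) + 1) = ((i + 1 : Nat) : Int) by push_cast; ring]
  rw [PySem.List.foldl_pyRange_pyGetD' cs ' '
        (fun acc c => if PySem.List.pyGetD cs (i : Int) ' ' == c then true else acc) false
        (by positivity)]
  rw [foldl_or_any]
  simp [PySem.List.pyGetD_natCast, List.getD_eq_getElem?_getD, h, List.any_beq]

theorem myFooALoop_eq (cs : List Char) (i : Nat) :
    myFooALoop cs i = (pvRef (cs.drop i)).map (fun c => String.mk [c]) := by
  by_cases h : i < cs.length
  · rw [List.drop_eq_getElem_cons h]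
    rw [myFooALoop, dif_pos h, myFooAflag_eq cs i h, myFooALoop_eq cs (i + 1)]
    by_cases hm : cs[i] ∈ cs.drop (i + 1)
    · simp [pvRef, hm]
    · simp [pvRef, hm, PySem.List.pyGetD_natCast, List.getD_eq_getElem?_getD, h]
  · rw [myFooALoop, dif_neg h]
    rw [List.drop_eq_nil_of_le (by omega)]
    simp [pvRef]
termination_by cs.length - i

theorem myFooB_fold (cs : List Char) :
    (cs.reverse.foldl myFooBStep (none, PySem.Set.empty)).1 = pvRef cs ∧
      ∀ x, x ∈ (cs.reverse.foldl myFooBStep (none, PySem.Set.empty)).2 ↔ x ∈ cs := by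
  induction cs with
  | nil => exact ⟨rfl, by simp [PySem.Set.empty]⟩
  | cons c t ih =>
      obtain ⟨ih1, ih2⟩ := ih
      rw [List.reverse_cons, List.foldl_append, List.foldl_cons, List.foldl_nil]
      set F := t.reverse.foldl myFooBStep (none, PySem.Set.empty) with hF
      have hcontain : PySem.Set.contains F.2 c = decide (c ∈ t) := by
        simp [PySem.Set.contains, ih2 c]
      constructor
      · show (myFooBStep _ c).1 = pvRef (c :: t)
        rw [show ∀ st, (myFooBStep st c).1
              = if PySem.Set.contains st.2 c then st.1 else some c from fun _ => rfl]
        rw [hcontain, ih1]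
        by_cases hm : c ∈ t <;> simp [pvRef, hm]
      · intro x
        show x ∈ (myFooBStep _ c).2 ↔ _
        rw [show ∀ st, (myFooBStep st c).2 = PySem.Set.add st.2 c from fun _ => rfl]
        rw [PySem.Set.mem_add]
        simp only [List.mem_cons, ih2]
        tauto

-- ===== VERDICT (by name: the statement is the Claim_ definition above) =====
theorem my_foo_spec : Claim_equal_my_foo := by
  intro s _
  show my_foo s = my_foo_alt s
  unfold my_foo my_foo_alt
  rw [myFooALoop_eq, (myFooB_fold s.toList).1, List.drop_zero]
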